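-- pv_equiv track=rewrite | github.com/gHashTag/vibee-lang | research/p_adic_algorithms.py | karatsuba_calls
-- ===== SOURCE A (Python) =====
-- def karatsuba_calls(n, depth=0):
--     """Count recursive calls at each level"""
--     if n <= 1:
--         return {depth: 1}
--
--     calls = {depth: 1}
--     for _ in range(3):  # 3 recursive calls
--         sub_calls = karatsuba_calls(n // 2, depth + 1)
--         for d, c in sub_calls.items():
--             calls[d] = calls.get(d, 0) + c
--     return calls
-- ===== SOURCE B (Python) =====
-- def karatsuba_calls(n, depth=0):
--     """Count recursive calls at each level: level depth+k has exactly 3**k calls."""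
--     levels = 0
--     m = n
--     while m > 1:
--         m //= 2
--         levels += 1
--     return {depth + k: 3 ** k for k in range(levels + 1)}
-- ===== Notes on version B (the rewrite author's own statement) =====
-- stated objective: faster
-- what changed: Replaces the exponential triple recursion with a closed form: compute the number of halving levels once and return {depth+k: 3**k} directly.
import Mathlib
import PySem

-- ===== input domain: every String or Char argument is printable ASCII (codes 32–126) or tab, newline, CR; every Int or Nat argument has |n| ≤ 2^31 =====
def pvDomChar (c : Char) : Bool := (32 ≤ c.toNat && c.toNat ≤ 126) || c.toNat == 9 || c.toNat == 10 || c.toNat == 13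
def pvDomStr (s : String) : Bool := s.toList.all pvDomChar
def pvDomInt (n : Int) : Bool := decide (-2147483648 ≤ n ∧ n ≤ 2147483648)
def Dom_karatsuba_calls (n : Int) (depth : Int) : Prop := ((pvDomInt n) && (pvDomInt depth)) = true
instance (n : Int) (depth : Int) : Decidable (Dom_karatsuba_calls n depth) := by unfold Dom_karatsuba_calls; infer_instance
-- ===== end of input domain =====

-- B replaces A's exponential triple recursion with a closed form {depth+k : 3^k} over the halving levels (faster).

-- ===== PORT A =====
-- the Python returns a dict; per the type convention its items list (insertion order) is the result
def karatsubaA (n : Int) (depth : Int) : PySem.Dict Int Int :=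
  if n ≤ 1 then PySem.Dict.empty.insert depth 1
  else
    (PySem.List.pyRange 0 3 1).foldl
      (fun calls _ =>
        ((karatsubaA (PySem.Int.floordiv n 2) (depth + 1)).items).foldl
          (fun c p => c.insert p.1 (c.getD p.1 0 + p.2)) calls)
      (PySem.Dict.empty.insert depth 1)
termination_by n.toNat
decreasing_by
  rw [PySem.Int.floordiv_eq_ediv_of_pos (by omega : (0:Int) < 2)]
  omega

def karatsuba_calls (n : Int) (depth : Int) : List (Int × Int) :=
  (karatsubaA n depth).items

-- ===== PORT B =====
-- 'while m > 1: m //= 2; levels += 1' as structural recursion on the same state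
def levelsB (n : Int) : Nat :=
  if n ≤ 1 then 0 else levelsB (PySem.Int.floordiv n 2) + 1
termination_by n.toNat
decreasing_by
  rw [PySem.Int.floordiv_eq_ediv_of_pos (by omega : (0:Int) < 2)]
  omega

def karatsuba_calls_alt (n : Int) (depth : Int) : List (Int × Int) :=
  (List.range (levelsB n + 1)).map (fun k : Nat => (depth + (k : Int), (3:Int) ^ k))

-- ===== PRECONDITION & SPEC =====
def Spec_karatsuba_calls (n : Int) (depth : Int) (out : List (Int × Int)) : Prop := out = karatsuba_calls_alt n depth
instance (n : Int) (depth : Int) (out : List (Int × Int)) : Decidable (Spec_karatsuba_calls n depth out) := by unfold Spec_karatsuba_calls; infer_instance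

-- ===== CLAIM (what is proved, stated in full; the proofs are below) =====
def Claim_equal_karatsuba_calls : Prop := ∀ (n : Int) (depth : Int), Dom_karatsuba_calls n depth → Spec_karatsuba_calls n depth (karatsuba_calls n depth)

-- ===== LEMMAS AND PROOFS =====

-- the inner 'for d, c in sub_calls.items(): calls[d] = calls.get(d, 0) + c' loop
def kMerge (D : PySem.Dict Int Int) (S : List (Int × Int)) : PySem.Dict Int Int :=
  S.foldl (fun c p => c.insert p.1 (c.getD p.1 0 + p.2)) D

lemma kMerge_fresh (S : List (Int × Int)) (D : PySem.Dict Int Int)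
    (hf : ∀ p ∈ S, D.contains p.1 = false)
    (hS : (S.map (·.1)).Nodup) :
    kMerge D S = PySem.Dict.mk (D.items ++ S) := by
  induction S generalizing D with
  | nil => simp only [kMerge, List.foldl_nil, List.append_nil]
  | cons p S ih =>
    obtain ⟨k, v⟩ := p
    have hc : D.contains k = false := hf (k, v) (by simp)
    simp only [kMerge, List.foldl_cons]
    rw [PySem.Dict.getD_of_not_contains D 0 hc, zero_add]
    simp only [List.map_cons, List.nodup_cons] at hS
    have hrec := ih (D.insert k v)
      (by
        intro q hq
        rw [PySem.Dict.contains_insert]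
        have hne : q.1 ≠ k := by
          intro he; exact hS.1 (he ▸ List.mem_map_of_mem hq)
        simp [hne, hf q (List.mem_cons_of_mem _ hq)])
      hS.2
    rw [kMerge] at hrec
    rw [hrec, PySem.Dict.items_insert_of_not_contains D v hc, List.append_assoc]
    rfl

lemma kMerge_bump (S : List (Int × Int)) (pre : List (Int × Int)) (f : Int → Int)
    (hnd : ((pre ++ S.map (fun p => (p.1, f p.2))).map (·.1)).Nodup) :
    kMerge (PySem.Dict.mk (pre ++ S.map (fun p => (p.1, f p.2)))) S
      = PySem.Dict.mk (pre ++ S.map (fun p => (p.1, f p.2 + p.2))) := by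
  induction S generalizing pre with
  | nil => simp [kMerge]
  | cons p S ih =>
    obtain ⟨k, v⟩ := p
    simp only [List.map_cons]
    have hnd' : (pre.map (·.1) ++ k :: (S.map (fun p => (p.1, f p.2))).map (·.1)).Nodup := by
      simpa using hnd
    have hknotpre : k ∉ pre.map (·.1) := fun h =>
      (List.disjoint_of_nodup_append hnd') h (by simp)
    have hknottail : k ∉ (S.map (fun p => (p.1, f p.2))).map (·.1) :=
      (List.nodup_cons.mp (hnd'.of_append_right)).1
    set D := PySem.Dict.mk (pre ++ ((k, f v) :: S.map (fun p => (p.1, f p.2)))) with hD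
    have hndD : D.keys.Nodup := by
      rw [hD, PySem.Dict.keys_mk]; simpa using hnd
    have hmem : (k, f v) ∈ D.items := by simp [hD]
    have hget : D.getD k 0 = f v := PySem.Dict.getD_of_mem_items D hmem hndD 0
    have hcont : D.contains k = true := by
      rw [PySem.Dict.contains_iff_mem_keys]
      rw [hD, PySem.Dict.keys_mk]
      simp
    have hstep : kMerge D ((k, v) :: S) = kMerge (D.insert k (f v + v)) S := by
      simp only [kMerge, List.foldl_cons, hget]
    have hins : (D.insert k (f v + v)).items
        = (pre ++ [(k, f v + v)]) ++ S.map (fun p => (p.1, f p.2)) := by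
      rw [PySem.Dict.items_insert_of_contains D (f v + v) hcont]
      simp only [hD]
      rw [List.map_append, List.map_cons]
      rw [List.append_assoc, List.singleton_append]
      congr 1
      · have hpre : ∀ q ∈ pre, (fun p => if (p.1 == k) = true then (k, f v + v) else p) q = id q := by
          intro q hq
          have hne : q.1 ≠ k := fun he => hknotpre (he ▸ List.mem_map_of_mem hq)
          simp [hne]
        rw [List.map_congr_left hpre, List.map_id]
      · simp only [beq_self_eq_true, if_pos]
        congr 1
        have htail : ∀ q ∈ S.map (fun p => (p.1, f p.2)),
            (fun p => if (p.1 == k) = true then (k, f v + v) else p) q = id q := by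
          intro q hq
          have hne : q.1 ≠ k := fun he => hknottail (he ▸ List.mem_map_of_mem hq)
          simp [hne]
        rw [List.map_congr_left htail, List.map_id]
    have hrw : D.insert k (f v + v)
        = PySem.Dict.mk ((pre ++ [(k, f v + v)]) ++ S.map (fun p => (p.1, f p.2))) :=
      PySem.Dict.ext hins
    rw [hstep, hrw]
    have ih' := ih (pre ++ [(k, f v + v)])
      (by
        have : ((pre ++ [(k, f v + v)]) ++ S.map (fun p => (p.1, f p.2))).map (·.1)
            = pre.map (·.1) ++ k :: (S.map (fun p => (p.1, f p.2))).map (·.1) := by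
          simp
        rw [this]; exact hnd')
    rw [ih']
    apply PySem.Dict.ext
    simp [List.append_assoc]

lemma keys_shape (depth : Int) (m : Nat) (g : Int → Int) :
    ((((depth, (1:Int)) :: ((List.range m).map (fun k : Nat => (depth + 1 + (k : Int), (3:Int) ^ k))).map
        (fun p => (p.1, g p.2))).map (·.1)).Nodup) := by
  simp only [List.map_cons, List.map_map]
  rw [List.nodup_cons]
  constructor
  · intro h
    obtain ⟨k, _, hk⟩ := List.mem_map.mp h
    simp only [Function.comp] at hk
    omega
  · apply List.Nodup.map _ List.nodup_range
    intro a b hab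
    simp only [Function.comp] at hab
    omega

lemma karatsubaA_items (n depth : Int) :
    (karatsubaA n depth).items
      = (List.range (levelsB n + 1)).map (fun k : Nat => (depth + (k : Int), (3:Int) ^ k)) := by
  by_cases h : n ≤ 1
  · rw [karatsubaA, levelsB]
    simp only [h, if_pos]
    rw [PySem.Dict.items_insert_of_not_contains PySem.Dict.empty 1 (by simp),
      (by decide : (PySem.Dict.empty : PySem.Dict Int Int).items = [])]
    simp
  · have ih := karatsubaA_items (PySem.Int.floordiv n 2) (depth + 1)
    rw [karatsubaA, levelsB]
    simp only [h, ite_false]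
    set L := levelsB (PySem.Int.floordiv n 2) with hL
    have hrange : PySem.List.pyRange 0 3 1 = [0, 1, 2] := by decide
    rw [hrange]
    simp only [List.foldl_cons, List.foldl_nil]
    set S := (List.range (L + 1)).map (fun k : Nat => (depth + 1 + (k : Int), (3:Int) ^ k)) with hS
    have hfold : ∀ (D : PySem.Dict Int Int),
        ((karatsubaA (PySem.Int.floordiv n 2) (depth + 1)).items).foldl
          (fun c p => c.insert p.1 (c.getD p.1 0 + p.2)) D = kMerge D S := by
      intro D; rw [kMerge, ih]
    rw [hfold, hfold, hfold]
    have hid : S.map (fun p => (p.1, p.2)) = S := by simp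
    have hD0items : (PySem.Dict.empty.insert depth (1:Int)).items = [(depth, 1)] := by
      rw [PySem.Dict.items_insert_of_not_contains PySem.Dict.empty 1 (by simp),
        (by decide : (PySem.Dict.empty : PySem.Dict Int Int).items = [])]
      rfl
    have hSkeys : (S.map (·.1)).Nodup := by
      rw [hS, List.map_map]
      apply List.Nodup.map _ List.nodup_range
      intro a b hab
      simp only [Function.comp] at hab
      omega
    have h1 : kMerge (PySem.Dict.empty.insert depth 1) S = PySem.Dict.mk ((depth, 1) :: S) := by
      rw [kMerge_fresh S _
        (by
          intro p hp
          rw [PySem.Dict.contains_insert]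
          have : p.1 ≠ depth := by
            rw [hS] at hp
            obtain ⟨k, _, hk⟩ := List.mem_map.mp hp
            rw [← hk]
            omega
          simp [this])
        hSkeys]
      rw [hD0items]
      rfl
    have h2 := kMerge_bump S [(depth, 1)] (fun v => v)
      (by simpa [hS] using keys_shape depth (L + 1) (fun v => v))
    simp only [List.singleton_append, hid] at h2
    have h3 := kMerge_bump S [(depth, 1)] (fun v => v + v)
      (by simpa [hS] using keys_shape depth (L + 1) (fun v => v + v))
    simp only [List.singleton_append] at h3
    rw [h1, h2, h3]
    show ((depth, 1) :: S.map (fun p => (p.1, p.2 + p.2 + p.2)))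
        = (List.range (L + 1 + 1)).map (fun k : Nat => (depth + (k : Int), (3:Int) ^ k))
    rw [List.range_succ_eq_map, List.map_cons, List.map_map]
    congr 1
    · norm_num
    · simp only [List.map_map]
      apply List.map_congr_left
      intro k _
      simp only [Function.comp, Nat.succ_eq_add_one, Prod.mk.injEq]
      refine ⟨by push_cast; ring, by rw [pow_succ]; ring⟩
termination_by n.toNat
decreasing_by
  rw [PySem.Int.floordiv_eq_ediv_of_pos (by omega : (0:Int) < 2)]
  omega

-- ===== VERDICT (by name: the statement is the Claim_ definition above) =====
theorem karatsuba_calls_spec : Claim_equal_karatsuba_calls := by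
  intro n depth _
  unfold Spec_karatsuba_calls karatsuba_calls karatsuba_calls_alt
  exact karatsubaA_items n depth
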